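-- pv_equiv track=rewrite | github.com/thetangstr/agentdash | scripts/github-issue-monitor.py | priority_from_labels
-- ===== SOURCE A (Python) =====
-- def priority_from_labels(labels: list[dict]) -> str:
--     label_names = {l["name"].lower() for l in labels}
--     if "critical" in label_names:
--         return "critical"
--     if "high" in label_names:
--         return "high"
--     if "medium" in label_names:
--         return "medium"
--     if "low" in label_names:
--         return "low"
--     return "medium"  # default
-- ===== SOURCE B (Python) =====
-- _RANK = {"critical": 0, "high": 1, "medium": 2, "low": 3}
-- _NAMES = ["critical", "high", "medium", "low"]
--
-- def priority_from_labels(labels: list[dict]) -> str: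
--     best = 4  # sentinel: no priority label seen
--     for l in labels:
--         r = _RANK.get(l["name"].lower(), 4)
--         if r < best:
--             best = r
--     return _NAMES[best] if best < 4 else "medium"
-- ===== Notes on version B (the rewrite author's own statement) =====
-- stated objective: alternative
-- what changed: Replaces the set-comprehension plus four ordered membership checks by a single pass that keeps the minimum priority rank (table lookup with a no-match sentinel) and indexes the answer from it.
import Mathlib
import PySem

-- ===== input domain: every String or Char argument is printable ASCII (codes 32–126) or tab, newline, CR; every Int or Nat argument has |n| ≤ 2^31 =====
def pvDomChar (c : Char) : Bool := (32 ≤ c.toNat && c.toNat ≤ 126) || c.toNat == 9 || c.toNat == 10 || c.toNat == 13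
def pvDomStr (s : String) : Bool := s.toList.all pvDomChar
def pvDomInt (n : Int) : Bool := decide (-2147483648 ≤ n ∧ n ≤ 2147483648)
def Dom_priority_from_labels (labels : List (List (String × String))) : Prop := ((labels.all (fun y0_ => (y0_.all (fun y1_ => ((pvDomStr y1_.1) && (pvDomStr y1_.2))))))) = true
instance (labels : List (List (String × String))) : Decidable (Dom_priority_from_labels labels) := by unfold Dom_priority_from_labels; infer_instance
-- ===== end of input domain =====

-- B is an alternative single-pass minimum-rank scan instead of A's set build plus four ordered
-- membership checks; equivalence of RETURN values is proved on inputs whose dicts all carry a "name" key.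

-- ===== PORT A =====
-- l["name"] is total only under Pre_; getD "" is used as the total form (exact wherever "name" is present).
def pvName (l : List (String × String)) : String :=
  PySem.Str.lower (PySem.Dict.getD (PySem.Dict.mk l) "name" "")

def priority_from_labels (labels : List (List (String × String))) : String :=
  let label_names : PySem.Set String := PySem.Set.ofList (labels.map pvName)
  if label_names.contains "critical" then "critical"
  else if label_names.contains "high" then "high"
  else if label_names.contains "medium" then "medium"
  else if label_names.contains "low" then "low"
  else "medium"

-- ===== PORT B =====
-- _RANK.get(name, 4)
def pvRank (n : String) : Nat :=
  PySem.Dict.getD (PySem.Dict.mk [("critical", 0), ("high", 1), ("medium", 2), ("low", 3)]) n 4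

def priority_from_labels_alt (labels : List (List (String × String))) : String :=
  let best := labels.foldl (fun best l =>
    let r := pvRank (PySem.Str.lower (PySem.Dict.getD (PySem.Dict.mk l) "name" ""))
    if r < best then r else best) 4
  if best < 4 then ["critical", "high", "medium", "low"].getD best "medium" else "medium"

-- ===== PRECONDITION & SPEC =====
-- Pre_ excludes exactly the inputs where l["name"] raises KeyError in both A and B.
def Pre_priority_from_labels (labels : List (List (String × String))) : Prop :=
  ∀ l ∈ labels, (PySem.Dict.mk l).contains "name" = true
instance (labels : List (List (String × String))) : Decidable (Pre_priority_from_labels labels) := by unfold Pre_priority_from_labels; infer_instance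
def pvWitness_priority_from_labels : (List (List (String × String))) :=
  [[("name", "High")], [("color", "red"), ("name", "low")]]

def Spec_priority_from_labels (labels : List (List (String × String))) (out : String) : Prop := out = priority_from_labels_alt labels
instance (labels : List (List (String × String))) (out : String) : Decidable (Spec_priority_from_labels labels out) := by unfold Spec_priority_from_labels; infer_instance

-- ===== CLAIM (what is proved, stated in full; the proofs are below) =====
def Claim_equal_priority_from_labels : Prop := ∀ (labels : List (List (String × String))), Dom_priority_from_labels labels → Pre_priority_from_labels labels → Spec_priority_from_labels labels (priority_from_labels labels)

-- ===== LEMMAS AND PROOFS =====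

theorem pvRank_eq (n : String) :
    pvRank n = if "critical" = n then 0 else if "high" = n then 1
               else if "medium" = n then 2 else if "low" = n then 3 else 4 := by
  unfold pvRank
  simp only [PySem.Dict.getD_eq_get?_getD, PySem.Dict.get?_mk_cons, beq_iff_eq]
  split_ifs <;> rfl

-- the value B's fold computes, characterised by memberships of the lowered names
def pvE (ns : List String) : Nat :=
  if "critical" ∈ ns then 0 else if "high" ∈ ns then 1
  else if "medium" ∈ ns then 2 else if "low" ∈ ns then 3 else 4

theorem pvE_le (ns : List String) : pvE ns ≤ 4 := by
  unfold pvE; split_ifs <;> omega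

theorem pvE_cons (n : String) (ns : List String) :
    pvE (n :: ns) = min (pvRank n) (pvE ns) := by
  rw [pvRank_eq]
  unfold pvE
  by_cases h1 : "critical" = n <;> by_cases h2 : "high" = n <;>
    by_cases h3 : "medium" = n <;> by_cases h4 : "low" = n <;>
    simp [List.mem_cons, h1, h2, h3, h4] <;> (try split_ifs) <;> omega

theorem pvFold_eq (labels : List (List (String × String))) (a : Nat) (ha : a ≤ 4) :
    labels.foldl (fun best l =>
      let r := pvRank (PySem.Str.lower (PySem.Dict.getD (PySem.Dict.mk l) "name" ""))
      if r < best then r else best) a = min a (pvE (labels.map pvName)) := by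
  induction labels generalizing a with
  | nil => simp [pvE]; omega
  | cons l ls ih =>
    have hr : PySem.Str.lower (PySem.Dict.getD (PySem.Dict.mk l) "name" "") = pvName l := rfl
    have h4 : pvRank (pvName l) ≤ 4 := by rw [pvRank_eq]; split_ifs <;> omega
    simp only [List.foldl_cons, List.map_cons, pvE_cons, hr]
    rw [ih]
    · split_ifs <;> omega
    · split_ifs <;> omega

-- ===== VERDICT (by name: the statement is the Claim_ definition above) =====
theorem priority_from_labels_spec : Claim_equal_priority_from_labels := by
  intro labels _ _
  unfold Spec_priority_from_labels priority_from_labels priority_from_labels_alt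
  rw [pvFold_eq labels 4 (by omega)]
  have hle := pvE_le (labels.map pvName)
  have h4 : min 4 (pvE (labels.map pvName)) = pvE (labels.map pvName) := by omega
  rw [h4]
  simp only [PySem.Set.contains_iff, PySem.Set.mem_ofList]
  unfold pvE
  split_ifs <;> first | rfl | omega
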